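-- pv_equiv track=rewrite | github.com/neurodigestai/neurodigest | summarizer.py | _has_copied_text
-- ===== SOURCE A (Python) =====
-- def _has_copied_text(summary: str, original: str) -> bool:
--     """Return True if the summary contains >30 consecutive characters
--     copied verbatim from the original content."""
--     if not original:
--         return False
--     summary_lower = summary.lower()
--     original_lower = original.lower()
--
--     # Slide a 30-char window over the summary
--     window = 31
--     for i in range(len(summary_lower) - window + 1):
--         chunk = summary_lower[i : i + window]
--         if chunk in original_lower:
--             return True
--     return False
-- ===== SOURCE B (Python) =====
-- def _has_copied_text(summary: str, original: str) -> bool: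
--     """Return True if the summary contains >30 consecutive characters
--     copied verbatim from the original content."""
--     summary_lower = summary.lower()
--     original_lower = original.lower()
--     window = 31
--     # Index every 31-char window of the original once, then check each
--     # summary window by set membership instead of scanning the original.
--     windows = {original_lower[j : j + window]
--                for j in range(len(original_lower) - window + 1)}
--     return any(summary_lower[i : i + window] in windows
--                for i in range(len(summary_lower) - window + 1))
-- ===== Notes on version B (the rewrite author's own statement) =====
-- stated objective: faster
-- what changed: B builds a hash set of all 31-char windows of the original once and checks each summary window by set membership, instead of A's substring scan of the whole original for every summary position.
import Mathlib
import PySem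

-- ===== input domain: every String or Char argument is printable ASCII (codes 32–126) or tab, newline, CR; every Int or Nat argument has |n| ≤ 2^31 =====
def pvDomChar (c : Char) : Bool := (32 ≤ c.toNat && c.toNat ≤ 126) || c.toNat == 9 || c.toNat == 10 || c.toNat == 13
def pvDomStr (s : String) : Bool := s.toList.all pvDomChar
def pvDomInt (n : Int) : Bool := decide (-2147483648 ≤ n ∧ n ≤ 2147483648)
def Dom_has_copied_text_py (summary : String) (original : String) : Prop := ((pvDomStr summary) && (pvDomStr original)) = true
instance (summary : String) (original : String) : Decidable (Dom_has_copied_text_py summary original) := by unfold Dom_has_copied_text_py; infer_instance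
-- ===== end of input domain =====

-- B replaces A's per-position substring scan of the original by a set of the
-- original's 31-char windows built once, checked by membership (faster, asymptotic).


-- ===== PORT A =====
-- for-loop with early 'return True' ≡ short-circuit any over the same index range
def has_copied_text_py (summary : String) (original : String) : Bool :=
  if original = "" then false
  else
    let summary_lower := PySem.Chars.lower summary.toList
    let original_lower := PySem.Chars.lower original.toList
    (PySem.List.pyRange 0 ((summary_lower.length : Int) - 31 + 1) 1).any (fun i =>
      PySem.Chars.isIn (PySem.Chars.slice summary_lower (some i) (some (i + 31))) original_lower)

-- ===== PORT B =====
def has_copied_text_py_alt (summary : String) (original : String) : Bool :=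
  let summary_lower := PySem.Chars.lower summary.toList
  let original_lower := PySem.Chars.lower original.toList
  let windows : PySem.Set (List Char) :=
    PySem.Set.ofList ((PySem.List.pyRange 0 ((original_lower.length : Int) - 31 + 1) 1).map
      (fun j => PySem.Chars.slice original_lower (some j) (some (j + 31))))
  (PySem.List.pyRange 0 ((summary_lower.length : Int) - 31 + 1) 1).any (fun i =>
    PySem.Set.contains windows (PySem.Chars.slice summary_lower (some i) (some (i + 31))))

-- ===== PRECONDITION & SPEC =====
def Spec_has_copied_text_py (summary : String) (original : String) (out : Bool) : Prop := out = has_copied_text_py_alt summary original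
instance (summary : String) (original : String) (out : Bool) : Decidable (Spec_has_copied_text_py summary original out) := by unfold Spec_has_copied_text_py; infer_instance

-- ===== CLAIM (what is proved, stated in full; the proofs are below) =====
def Claim_equal_has_copied_text_py : Prop := ∀ (summary : String) (original : String), Dom_has_copied_text_py summary original → Spec_has_copied_text_py summary original (has_copied_text_py summary original)

-- ===== LEMMAS AND PROOFS =====

-- a list of length 31 is an infix of o iff it equals one of o's 31-char windows
theorem infix_iff_mem_windows (c o : List Char) (hc : c.length = 31) :
    (c <:+: o) ↔ ∃ j : Int, (0 ≤ j ∧ j < (o.length : Int) - 31 + 1) ∧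
      PySem.Chars.slice o (some j) (some (j + 31)) = c := by
  constructor
  · rintro ⟨pre, suf, rfl⟩
    refine ⟨(pre.length : Int), ⟨by positivity, ?_⟩, ?_⟩
    · simp only [List.length_append]
      push_cast
      omega
    · have h31 : (pre.length : Int) + 31 = ((pre.length + 31 : Nat) : Int) := by push_cast; ring
      rw [h31]
      simp only [PySem.Chars.slice_eq_listSlice, PySem.List.slice_natCast]
      have : pre.length + 31 - pre.length = c.length := by omega
      rw [this]
      simp
  · rintro ⟨j, ⟨hj0, hjlt⟩, hslice⟩
    obtain ⟨k, rfl⟩ : ∃ k : Nat, j = (k : Int) := ⟨j.toNat, (Int.toNat_of_nonneg hj0).symm⟩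
    have h31 : (k : Int) + 31 = ((k : Int) + ((31 : Nat) : Int)) := by norm_num
    rw [h31, PySem.Chars.slice_eq_listSlice, PySem.List.slice_natCast_add] at hslice
    rw [← hslice]
    exact ((o.drop k).take_prefix 31).isInfix.trans (o.drop_suffix k).isInfix

-- per-position: A's substring test of o equals B's membership test in o's window set
theorem chunk_eq (c o : List Char) (hc : c.length = 31) :
    PySem.Chars.isIn c o =
      PySem.Set.contains
        (PySem.Set.ofList ((PySem.List.pyRange 0 ((o.length : Int) - 31 + 1) 1).map
          (fun j => PySem.Chars.slice o (some j) (some (j + 31))))) c := by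
  rw [Bool.eq_iff_iff, PySem.Chars.isIn_iff_infix,
      PySem.Set.contains_iff, PySem.Set.mem_ofList, List.mem_map]
  rw [infix_iff_mem_windows c o hc]
  constructor
  · rintro ⟨j, hj, hs⟩
    exact ⟨j, PySem.List.mem_pyRange_one.mpr hj, hs⟩
  · rintro ⟨j, hj, hs⟩
    exact ⟨j, PySem.List.mem_pyRange_one.mp hj, hs⟩

-- every chunk A slices out of the summary has length exactly 31
theorem chunk_len (s : List Char) (i : Int) (h0 : 0 ≤ i)
    (hlt : i < (s.length : Int) - 31 + 1) :
    (PySem.Chars.slice s (some i) (some (i + 31))).length = 31 := by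
  obtain ⟨k, rfl⟩ : ∃ k : Nat, i = (k : Int) := ⟨i.toNat, (Int.toNat_of_nonneg h0).symm⟩
  have h31 : (k : Int) + 31 = ((k : Int) + ((31 : Nat) : Int)) := by norm_num
  rw [h31, PySem.Chars.slice_eq_listSlice, PySem.List.slice_natCast_add]
  have hk : k + 31 ≤ s.length := by omega
  simp
  omega

-- ===== VERDICT (by name: the statement is the Claim_ definition above) =====
theorem has_copied_text_py_spec : Claim_equal_has_copied_text_py := by
  intro summary original _
  unfold Spec_has_copied_text_py has_copied_text_py has_copied_text_py_alt
  by_cases ho : original = ""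
  · -- original empty: A short-circuits to false; B's window set is empty, so every
    -- membership test is false
    subst ho
    have hnil : (("" : String).toList) = [] := rfl
    have hlow : PySem.Chars.lower ([] : List Char) = [] := rfl
    have hrange : PySem.List.pyRange 0 ((([] : List Char).length : Int) - 31 + 1) 1 = [] := by decide
    simp only [hnil, hlow, hrange, List.map_nil, if_pos trivial]
    rw [eq_comm, List.any_eq_false]
    intro i _
    simp [PySem.Set.ofList, PySem.Set.contains]
  · -- original nonempty: both sides scan the same index range; pointwise the tests agree
    simp only [if_neg ho]
    apply PySem.List.any_congr_mem
    intro i hi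
    obtain ⟨h0, hlt⟩ := PySem.List.mem_pyRange_one.mp hi
    exact chunk_eq _ _ (chunk_len _ i h0 hlt)
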